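-- pv_equiv track=rewrite | github.com/nick1256/sozopol_tournament | utilities/generate_round.py | backtrack
-- ===== SOURCE A (Python) =====
-- def backtrack(at_start,assignment,team_names,domains):
--
-- 	# assignment is complete
-- 	if len(team_names)==0:
-- 		return assignment
--
-- 	first_team = team_names[0]
-- 	for second_team in team_names:
--
-- 		if second_team not in domains[first_team]: continue
--
-- 		new_team_names = [i for i in team_names if i!=first_team and i!=second_team]
-- 		new_assignment=[i for i in assignment]
-- 		new_assignment.append([first_team,second_team])
--
-- 		result = backtrack(False,new_assignment,new_team_names,domains)
--
-- 		if result!=None: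
-- 			return result
--
-- 	return None
-- ===== SOURCE B (Python) =====
-- def backtrack(at_start, assignment, team_names, domains):
--     # Iterative DFS: explicit stack of frames (assignment, names, candidates still to try for names[0]).
--     stack = [(assignment, team_names, team_names)]
--     while stack:
--         asg, names, cands = stack.pop()
--         if not names:
--             return asg
--         first = names[0]
--         dom = domains[first]
--         while cands:
--             cand, cands = cands[0], cands[1:]
--             if cand in dom:
--                 stack.append((asg, names, cands))
--                 new_names = [i for i in names if i != first and i != cand]
--                 stack.append((asg + [[first, cand]], new_names, new_names))
--                 break
--     return None
-- ===== Notes on version B (the rewrite author's own statement) =====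
-- stated objective: alternative
-- what changed: replaced A's recursive DFS by an iterative loop over an explicit stack of (assignment, remaining-names, pending-candidates) search frames, preserving the exact search order
-- outside the precondition, e.g. on backtrack(True, [], ['x', 'y'], {'x': ['y']}): A returns [['x', 'y']], B returns [['x', 'y']]
import Mathlib
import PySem

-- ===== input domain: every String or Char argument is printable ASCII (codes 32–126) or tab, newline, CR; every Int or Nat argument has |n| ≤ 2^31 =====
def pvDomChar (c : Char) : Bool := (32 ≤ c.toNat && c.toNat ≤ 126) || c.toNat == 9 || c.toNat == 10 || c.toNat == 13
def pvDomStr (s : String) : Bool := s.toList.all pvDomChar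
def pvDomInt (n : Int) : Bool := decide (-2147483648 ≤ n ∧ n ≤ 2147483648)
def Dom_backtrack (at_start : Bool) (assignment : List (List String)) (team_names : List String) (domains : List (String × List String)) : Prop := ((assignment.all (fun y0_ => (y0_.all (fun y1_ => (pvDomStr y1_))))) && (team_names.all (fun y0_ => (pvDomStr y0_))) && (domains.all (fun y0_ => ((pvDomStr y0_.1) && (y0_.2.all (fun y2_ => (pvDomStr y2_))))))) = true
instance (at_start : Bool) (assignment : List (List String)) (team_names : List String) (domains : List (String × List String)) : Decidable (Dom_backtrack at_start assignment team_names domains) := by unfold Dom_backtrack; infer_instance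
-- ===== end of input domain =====

-- B replaces A's recursive DFS by an iterative loop over an explicit stack of search frames
-- (same search order, same result); equivalence is about the return value only.

-- first-match association-list lookup = Python dict lookup (none = KeyError, excluded by Pre_)
def pvLookup (domains : List (String × List String)) (k : String) : Option (List String) :=
  match domains with
  | [] => none
  | (k', v) :: rest => if k' == k then some v else pvLookup rest k

-- termination lemma cited by the port of A: the filtered name list is strictly shorter
theorem pvFilter_lt (first s : String) (tail : List String) :
    ((first :: tail).filter (fun i => i != first && i != s)).length < tail.length + 1 := by
  have h : (first :: tail).filter (fun i => i != first && i != s)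
      = tail.filter (fun i => i != first && i != s) := by simp [List.filter]
  rw [h]
  exact Nat.lt_succ_of_le (List.length_filter_le _ _)

-- ===== PORT A =====
mutual
def backtrack (at_start : Bool) (assignment : List (List String)) (team_names : List String) (domains : List (String × List String)) : Option (List (List String)) :=
  match team_names with
  | [] => some assignment
  | first :: tail =>
    match pvLookup domains first with
    | none => none   -- Python raises KeyError here; excluded by Pre_backtrack
    | some dom => backtrackGo assignment tail domains first dom (first :: tail)
termination_by (team_names.length, team_names.length + 1)
decreasing_by
  simp only [List.length_cons]
  exact Prod.Lex.right _ (Nat.lt_succ_self _)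

-- A's `for second_team in team_names` loop with early return, over the candidate suffix `cands`
def backtrackGo (assignment : List (List String)) (tail : List String) (domains : List (String × List String)) (first : String) (dom : List String) (cands : List String) : Option (List (List String)) :=
  match cands with
  | [] => none
  | s :: rest =>
    if s ∈ dom then
      match backtrack false (assignment ++ [[first, s]]) ((first :: tail).filter (fun i => i != first && i != s)) domains with
      | some r => some r
      | none => backtrackGo assignment tail domains first dom rest
    else backtrackGo assignment tail domains first dom rest
termination_by (tail.length + 1, cands.length)
decreasing_by
  · exact Prod.Lex.left _ _ (pvFilter_lt first s tail)
  · exact Prod.Lex.right _ (Nat.lt_succ_self _)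
  · exact Prod.Lex.right _ (Nat.lt_succ_self _)
end

-- ===== PORT B =====
-- a search frame: (partial assignment, remaining team names, candidates still to try for names[0])
abbrev PvFrame := List (List String) × List String × List String

-- the inner `while cands` loop: first candidate in `dom`, with the remaining suffix
def pvScan (dom : List String) (cands : List String) : Option (String × List String) :=
  match cands with
  | [] => none
  | c :: rest => if c ∈ dom then some (c, rest) else pvScan dom rest

-- fuel bound making the stack loop total (a totality guard only; proven sufficient below)
def pvFuel : Nat → Nat
  | 0 => 1
  | n + 1 => 1 + (n + 1) * (pvFuel n + 1)

-- B's outer `while stack` loop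
def pvRun (domains : List (String × List String)) (fuel : Nat) (stack : List PvFrame) : Option (List (List String)) :=
  match fuel, stack with
  | _, [] => none
  | 0, _ :: _ => none   -- fuel exhausted: unreachable for the bound used below
  | fuel + 1, (asg, names, cands) :: stack =>
    match names with
    | [] => some asg
    | first :: _ =>
      match pvLookup domains first with
      | none => none   -- Python raises KeyError here; excluded by Pre_backtrack
      | some dom =>
        match pvScan dom cands with
        | none => pvRun domains fuel stack
        | some (cand, rest) =>
          let nn := names.filter (fun i => i != first && i != cand)
          pvRun domains fuel ((asg ++ [[first, cand]], nn, nn) :: (asg, names, rest) :: stack)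

def backtrack_alt (at_start : Bool) (assignment : List (List String)) (team_names : List String) (domains : List (String × List String)) : Option (List (List String)) :=
  pvRun domains (pvFuel team_names.length) [(assignment, team_names, team_names)]

-- ===== PRECONDITION & SPEC =====
-- Pre_ requires every team name to be a key of domains: A raises KeyError when a missing name is
-- looked up; A can also return normally with a missing key that the search never looks up (it ends
-- first), but the exact set would require simulating the search, so those inputs are also excluded.
def Pre_backtrack (at_start : Bool) (assignment : List (List String)) (team_names : List String) (domains : List (String × List String)) : Prop :=
  team_names.all (fun t => domains.any (fun p => p.1 == t)) = true
instance (at_start : Bool) (assignment : List (List String)) (team_names : List String) (domains : List (String × List String)) : Decidable (Pre_backtrack at_start assignment team_names domains) := by unfold Pre_backtrack; infer_instance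

def pvWitness_backtrack : Bool × List (List String) × List String × (List (String × List String)) :=
  (true, [], ["a", "b"], [("a", ["b"]), ("b", ["a"])])

def Spec_backtrack (at_start : Bool) (assignment : List (List String)) (team_names : List String) (domains : List (String × List String)) (out : Option (List (List String))) : Prop := out = backtrack_alt at_start assignment team_names domains
instance (at_start : Bool) (assignment : List (List String)) (team_names : List String) (domains : List (String × List String)) (out : Option (List (List String))) : Decidable (Spec_backtrack at_start assignment team_names domains out) := by unfold Spec_backtrack; infer_instance

-- ===== CLAIM (what is proved, stated in full; the proofs are below) =====
def Claim_equal_backtrack : Prop := ∀ (at_start : Bool) (assignment : List (List String)) (team_names : List String) (domains : List (String × List String)), Dom_backtrack at_start assignment team_names domains → Pre_backtrack at_start assignment team_names domains → Spec_backtrack at_start assignment team_names domains (backtrack at_start assignment team_names domains)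

-- ===== LEMMAS AND PROOFS =====

-- the value A's search assigns to one frame of B's stack
def pvEvalFrame (domains : List (String × List String)) (f : PvFrame) : Option (List (List String)) :=
  match f with
  | (asg, names, cands) =>
    match names with
    | [] => some asg
    | first :: tail =>
      match pvLookup domains first with
      | none => none
      | some dom => backtrackGo asg tail domains first dom cands

def pvEvalStack (domains : List (String × List String)) (stack : List PvFrame) : Option (List (List String)) :=
  match stack with
  | [] => none
  | f :: s =>
    match pvEvalFrame domains f with
    | some r => some r
    | none => pvEvalStack domains s

def pvCost (f : PvFrame) : Nat :=
  match f.2.1 with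
  | [] => 1
  | _ :: t => 1 + f.2.2.length * (pvFuel t.length + 1)

def pvStackCost (stack : List PvFrame) : Nat := (stack.map pvCost).sum

def pvGood (domains : List (String × List String)) (stack : List PvFrame) : Prop :=
  ∀ f ∈ stack, ∀ t ∈ f.2.1, (pvLookup domains t).isSome = true

theorem pvFuel_pos (n : Nat) : 1 ≤ pvFuel n := by
  cases n <;> simp [pvFuel]

theorem pvFuel_mono {m n : Nat} (h : m ≤ n) : pvFuel m ≤ pvFuel n := by
  induction n with
  | zero =>
    have hm : m = 0 := Nat.le_zero.mp h
    simp [hm]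
  | succ k ih =>
    rcases Nat.lt_or_ge m (k + 1) with h' | h'
    · have h1 := ih (Nat.lt_succ_iff.mp h')
      have hk : pvFuel k ≤ pvFuel (k + 1) := by
        have := pvFuel_pos k
        simp [pvFuel]
        nlinarith
      omega
    · have : m = k + 1 := by omega
      simp [this]

theorem pvCost_fresh (asg : List (List String)) (names : List String) :
    pvCost (asg, names, names) = pvFuel names.length := by
  cases names with
  | nil => simp [pvCost, pvFuel]
  | cons h t => simp [pvCost, pvFuel]

theorem pvEvalStack_cons (domains : List (String × List String)) (f : PvFrame) (s : List PvFrame) :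
    pvEvalStack domains (f :: s) =
      match pvEvalFrame domains f with
      | some r => some r
      | none => pvEvalStack domains s := rfl

theorem pvScan_none {dom : List String} {cands : List String} (h : pvScan dom cands = none)
    (asg : List (List String)) (tail : List String) (domains : List (String × List String)) (first : String) :
    backtrackGo asg tail domains first dom cands = none := by
  induction cands with
  | nil => simp [backtrackGo]
  | cons c rest ih =>
    by_cases hc : c ∈ dom
    · simp [pvScan, hc] at h
    · simp [pvScan, hc] at h
      rw [show backtrackGo asg tail domains first dom (c :: rest) = backtrackGo asg tail domains first dom rest from by
        simp [backtrackGo, hc]]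
      exact ih h

theorem pvScan_some_go {dom cands : List String} {cand : String} {rest : List String}
    (h : pvScan dom cands = some (cand, rest))
    (asg : List (List String)) (tail : List String) (domains : List (String × List String)) (first : String) :
    backtrackGo asg tail domains first dom cands =
      (match backtrack false (asg ++ [[first, cand]]) ((first :: tail).filter (fun i => i != first && i != cand)) domains with
       | some r => some r
       | none => backtrackGo asg tail domains first dom rest) := by
  induction cands with
  | nil => simp [pvScan] at h
  | cons c rest' ih =>
    by_cases hc : c ∈ dom
    · simp [pvScan, hc] at h
      obtain ⟨h1, h2⟩ := h
      subst h1; subst h2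
      simp [backtrackGo, hc]
    · simp [pvScan, hc] at h
      rw [show backtrackGo asg tail domains first dom (c :: rest') = backtrackGo asg tail domains first dom rest' from by
        simp [backtrackGo, hc]]
      exact ih h

theorem pvScan_some_len {dom cands : List String} {cand : String} {rest : List String}
    (h : pvScan dom cands = some (cand, rest)) : rest.length < cands.length := by
  induction cands with
  | nil => simp [pvScan] at h
  | cons c rest' ih =>
    by_cases hc : c ∈ dom
    · simp [pvScan, hc] at h
      obtain ⟨_, h2⟩ := h
      subst h2; simp
    · simp [pvScan, hc] at h
      exact Nat.lt_trans (ih h) (Nat.lt_succ_self _)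

theorem pvEvalFrame_fresh (domains : List (String × List String)) (b : Bool) (asg : List (List String)) (names : List String) :
    pvEvalFrame domains (asg, names, names) = backtrack b asg names domains := by
  cases names with
  | nil => simp [pvEvalFrame, backtrack]
  | cons first tail =>
    rw [backtrack]
    simp only [pvEvalFrame]

theorem pvRun_eval (domains : List (String × List String)) (fuel : Nat) :
    ∀ stack : List PvFrame, pvStackCost stack ≤ fuel → pvGood domains stack →
      pvRun domains fuel stack = pvEvalStack domains stack := by
  induction fuel with
  | zero =>
    intro stack hc _
    cases stack with
    | nil => simp [pvRun, pvEvalStack]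
    | cons f s =>
      exfalso
      have h1 : 1 ≤ pvCost f := by
        unfold pvCost; cases f.2.1 <;> simp
      simp [pvStackCost] at hc
      omega
  | succ fuel ih =>
    intro stack hc hg
    cases stack with
    | nil => simp [pvRun, pvEvalStack]
    | cons f s =>
      obtain ⟨asg, names, cands⟩ := f
      cases names with
      | nil => simp [pvRun, pvEvalStack, pvEvalFrame]
      | cons first tail =>
        have hfirst : (pvLookup domains first).isSome = true :=
          hg _ (List.mem_cons_self ..) first (by simp)
        obtain ⟨dom, hdom⟩ := Option.isSome_iff_exists.mp hfirst
        have hcostf : pvCost (asg, first :: tail, cands) = 1 + cands.length * (pvFuel tail.length + 1) := by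
          simp [pvCost]
        cases hscan : pvScan dom cands with
        | none =>
          have hs : pvStackCost s ≤ fuel := by
            simp [pvStackCost] at hc ⊢
            omega
          have hgs : pvGood domains s := fun f hf => hg f (List.mem_cons_of_mem _ hf)
          simp only [pvRun, hdom, hscan]
          rw [ih s hs hgs, pvEvalStack_cons]
          have hfr : pvEvalFrame domains (asg, first :: tail, cands) = none := by
            simp [pvEvalFrame, hdom, pvScan_none hscan]
          rw [hfr]
        | some cr =>
          obtain ⟨cand, rest⟩ := cr
          set nn := (first :: tail).filter (fun i => i != first && i != cand) with hnn
          have hnnlen : nn.length ≤ tail.length := by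
            have h1 : nn = tail.filter (fun i => i != first && i != cand) := by
              simp [hnn, List.filter]
            rw [h1]; exact List.length_filter_le _ _
          have hrest : rest.length < cands.length := pvScan_some_len hscan
          have hcost2 : pvStackCost ((asg ++ [[first, cand]], nn, nn) :: (asg, first :: tail, rest) :: s) ≤ fuel := by
            simp only [pvStackCost, List.map_cons, List.sum_cons] at hc ⊢
            rw [pvCost_fresh]
            have h1 : pvFuel nn.length ≤ pvFuel tail.length := pvFuel_mono hnnlen
            have h2 : pvCost (asg, first :: tail, rest) = 1 + rest.length * (pvFuel tail.length + 1) := by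
              simp [pvCost]
            rw [h2]
            rw [hcostf] at hc
            nlinarith [pvFuel_pos tail.length]
          have hg2 : pvGood domains ((asg ++ [[first, cand]], nn, nn) :: (asg, first :: tail, rest) :: s) := by
            intro f hf t ht
            simp only [List.mem_cons] at hf
            rcases hf with h | h | h
            · subst h
              have ht' : t ∈ nn := ht
              rw [hnn] at ht'
              exact hg (asg, first :: tail, cands) (List.mem_cons_self ..) t (List.mem_of_mem_filter ht')
            · subst h
              exact hg (asg, first :: tail, cands) (List.mem_cons_self ..) t ht
            · exact hg f (List.mem_cons_of_mem _ h) t ht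
          simp only [pvRun, hdom, hscan]
          rw [ih _ hcost2 hg2]
          rw [pvEvalStack_cons, pvEvalStack_cons, pvEvalStack_cons]
          rw [pvEvalFrame_fresh domains false]
          have hf' : pvEvalFrame domains (asg, first :: tail, rest) = backtrackGo asg tail domains first dom rest := by
            simp [pvEvalFrame, hdom]
          have hfc : pvEvalFrame domains (asg, first :: tail, cands) = backtrackGo asg tail domains first dom cands := by
            simp [pvEvalFrame, hdom]
          rw [hf', hfc, pvScan_some_go hscan, ← hnn]
          cases backtrack false (asg ++ [[first, cand]]) nn domains <;> simp

theorem backtrack_at_start_irrel (b : Bool) (asg : List (List String)) (names : List String) (domains : List (String × List String)) :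
    backtrack b asg names domains = backtrack false asg names domains := by
  rw [backtrack.eq_def, backtrack.eq_def]

theorem pvAny_lookup {t : String} : ∀ (domains : List (String × List String)),
    domains.any (fun p => p.1 == t) = true → (pvLookup domains t).isSome = true
  | [], h => by simp at h
  | (k, v) :: rest, h => by
    by_cases hk : (k == t) = true
    · simp [pvLookup, hk]
    · simp only [List.any_cons, Bool.or_eq_true] at h
      rcases h with h1 | h1
      · exact absurd h1 hk
      · simp only [pvLookup, hk]
        exact pvAny_lookup rest h1

theorem pvPre_lookup {team_names : List String} {domains : List (String × List String)}
    (hp : team_names.all (fun t => domains.any (fun p => p.1 == t)) = true)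
    {t : String} (ht : t ∈ team_names) : (pvLookup domains t).isSome = true :=
  pvAny_lookup domains ((List.all_eq_true.mp hp) t ht)

-- ===== VERDICT (by name: the statement is the Claim_ definition above) =====
theorem backtrack_spec : Claim_equal_backtrack := by
  intro at_start assignment team_names domains _ hpre
  unfold Spec_backtrack backtrack_alt
  have hg : pvGood domains [(assignment, team_names, team_names)] := by
    intro f hf t ht
    simp only [List.mem_cons, List.not_mem_nil, or_false] at hf
    subst hf
    exact pvPre_lookup hpre ht
  have hc : pvStackCost [(assignment, team_names, team_names)] ≤ pvFuel team_names.length := by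
    simp [pvStackCost, pvCost_fresh]
  rw [pvRun_eval domains _ _ hc hg]
  rw [pvEvalStack_cons, pvEvalFrame_fresh domains false]
  rw [backtrack_at_start_irrel at_start]
  cases backtrack false assignment team_names domains <;> simp [pvEvalStack]
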